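-- pv_equiv track=rewrite | github.com/LisandroRomero2023/progra1ecfm | Final/Problema1.py | pilasCompletas
-- ===== SOURCE A (Python) =====
-- from math import factorial, ceil
--
-- def pilasCompletas(numero):
--     n=numero
--     contador= 0
--     mitad = ceil(numero/2)+1
--     for i in range (mitad):
--         for j in range(numero-2*i+1):
--             parte = factorial(n) // (factorial(i)*factorial(i)*factorial(j)*factorial(n-2*i-j))
--             contador += parte
--     return contador
-- ===== SOURCE B (Python) =====
-- from math import comb
--
-- def pilasCompletas(numero):
--     n = numero
--     total = 0
--     for i in range(n // 2 + 1):
--         total += comb(n, 2 * i) * comb(2 * i, i) * 2 ** (n - 2 * i)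
--     return total
-- ===== Notes on version B (the rewrite author's own statement) =====
-- stated objective: faster
-- what changed: Replaces A's nested i,j loops over factorial-quotient multinomial terms by a single loop over i whose term is the closed form comb(n,2*i)*comb(2*i,i)*2**(n-2*i), collapsing the inner j-sum via the binomial theorem.
import Mathlib
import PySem

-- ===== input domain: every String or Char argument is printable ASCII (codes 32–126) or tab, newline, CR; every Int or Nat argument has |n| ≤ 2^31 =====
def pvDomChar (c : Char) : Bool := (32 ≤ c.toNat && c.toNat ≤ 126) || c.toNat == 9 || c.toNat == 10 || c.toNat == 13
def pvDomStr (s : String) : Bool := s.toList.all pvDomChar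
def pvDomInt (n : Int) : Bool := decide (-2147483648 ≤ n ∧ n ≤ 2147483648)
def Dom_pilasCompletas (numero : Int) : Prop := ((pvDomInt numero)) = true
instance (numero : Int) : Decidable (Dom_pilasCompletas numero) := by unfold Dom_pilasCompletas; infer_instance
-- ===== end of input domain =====

-- B replaces A's nested i,j loops of factorial quotients by a single loop whose term is the
-- closed form comb(n,2i)*comb(2i,i)*2^(n-2i) (the inner j-sum collapsed); objective: simpler.

-- ===== PORT A =====
-- Python's math.factorial raises on negative arguments; A's loop bounds guarantee every
-- argument it passes is nonnegative, where (k.toNat)! is exact.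
def pyFact (k : Int) : Int := (Nat.factorial k.toNat : Int)

-- ceil(numero/2) is ported as -((-numero) // 2); Python's float ceil(numero/2) is exact for |numero| ≤ 2^31.
def pilasCompletas (numero : Int) : Int :=
  let n := numero
  let mitad := -(PySem.Int.floordiv (-numero) 2) + 1
  (PySem.List.pyRange 0 mitad 1).foldl
    (fun contador i =>
      (PySem.List.pyRange 0 (numero - 2 * i + 1) 1).foldl
        (fun contador j =>
          contador + PySem.Int.floordiv (pyFact n)
            (pyFact i * pyFact i * pyFact j * pyFact (n - 2 * i - j)))
        contador)
    0

-- ===== PORT B =====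
-- Python's math.comb raises on negative arguments; B only calls it with 0 ≤ k ≤ n,
-- where Nat.choose on toNat is exact.
def pyComb (n k : Int) : Int := (Nat.choose n.toNat k.toNat : Int)

def pilasCompletas_alt (numero : Int) : Int :=
  let n := numero
  (PySem.List.pyRange 0 (PySem.Int.floordiv numero 2 + 1) 1).foldl
    (fun total i =>
      total + pyComb n (2 * i) * pyComb (2 * i) i * 2 ^ (n - 2 * i).toNat)
    0

-- ===== PRECONDITION & SPEC =====
def Spec_pilasCompletas (numero : Int) (out : Int) : Prop := out = pilasCompletas_alt numero
instance (numero : Int) (out : Int) : Decidable (Spec_pilasCompletas numero out) := by unfold Spec_pilasCompletas; infer_instance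

-- ===== CLAIM (what is proved, stated in full; the proofs are below) =====
def Claim_equal_pilasCompletas : Prop := ∀ (numero : Int), Dom_pilasCompletas numero → Spec_pilasCompletas numero (pilasCompletas numero)

-- ===== LEMMAS AND PROOFS =====

-- Nat-level images of the two ports (proof-only helpers).
def aTerm (m i j : Nat) : Nat :=
  m.factorial / (i.factorial * i.factorial * j.factorial * (m - 2*i - j).factorial)

def aSum (m : Nat) : Nat :=
  ((List.range ((m+1)/2 + 1)).map
    (fun i => ((List.range (m + 1 - 2*i)).map (fun j => aTerm m i j)).sum)).sum

def bSum (m : Nat) : Nat :=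
  ((List.range (m/2 + 1)).map
    (fun i => m.choose (2*i) * (2*i).choose i * 2^(m - 2*i))).sum

lemma list_sum_range_choose (M : Nat) :
    ((List.range (M+1)).map (fun j => M.choose j)).sum = 2 ^ M := by
  have h : ((List.range (M+1)).map (fun j => M.choose j)).sum
      = ∑ j ∈ Finset.range (M+1), M.choose j := Nat.add_zero _
  rw [h, Nat.sum_range_choose]

-- each multinomial term factors through binomials
lemma aTerm_eq (m i j : Nat) (hi : 2*i ≤ m) (hj : j ≤ m - 2*i) :
    aTerm m i j = m.choose (2*i) * (2*i).choose i * (m - 2*i).choose j := by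
  unfold aTerm
  apply Nat.div_eq_of_eq_mul_left
  · positivity
  · have h1 := Nat.choose_mul_factorial_mul_factorial hi
    have h2 := Nat.choose_mul_factorial_mul_factorial
      (Nat.le_mul_of_pos_left i (by norm_num) : i ≤ 2*i)
    have h3 := Nat.choose_mul_factorial_mul_factorial hj
    have e2 : 2*i - i = i := by omega
    rw [e2] at h2
    calc m.factorial = m.choose (2*i) * (2*i).factorial * (m - 2*i).factorial := h1.symm
      _ = m.choose (2*i) * ((2*i).choose i * i.factorial * i.factorial)
            * ((m-2*i).choose j * j.factorial * ((m-2*i) - j).factorial) := by rw [h2, h3]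
      _ = m.choose (2*i) * (2*i).choose i * (m - 2*i).choose j
            * (i.factorial * i.factorial * j.factorial * (m - 2*i - j).factorial) := by ring

lemma pvInnerSum (m i : Nat) (hi : 2*i ≤ m) :
    ((List.range (m + 1 - 2*i)).map (fun j => aTerm m i j)).sum
      = m.choose (2*i) * (2*i).choose i * 2^(m - 2*i) := by
  have hM : m + 1 - 2*i = (m - 2*i) + 1 := by omega
  rw [hM]
  rw [List.map_congr_left (fun j hj => aTerm_eq m i j hi (by
    simp only [List.mem_range] at hj; omega))]
  rw [List.sum_map_mul_left, list_sum_range_choose]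

lemma aSum_eq_bSum (m : Nat) : aSum m = bSum m := by
  unfold aSum bSum
  rcases Nat.even_or_odd m with he | ho
  · obtain ⟨a, ha⟩ := he
    have h2 : (m+1)/2 = m/2 := by omega
    rw [h2]
    exact congrArg _ (List.map_congr_left fun i hi =>
      pvInnerSum m i (by simp only [List.mem_range] at hi; omega))
  · obtain ⟨a, ha⟩ := ho
    have h2 : (m+1)/2 + 1 = (m/2 + 1) + 1 := by omega
    rw [h2, List.range_succ, List.map_append, List.sum_append]
    have hz : m + 1 - 2*(m/2 + 1) = 0 := by omega
    simp only [List.map_cons, List.map_nil, hz, List.range_zero, List.sum_cons,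
      List.sum_nil, add_zero]
    exact congrArg _ (List.map_congr_left fun i hi =>
      pvInnerSum m i (by simp only [List.mem_range] at hi; omega))

lemma portA_nat (m : Nat) : pilasCompletas (m : Int) = (aSum m : Int) := by
  unfold pilasCompletas aSum
  have hfd : -(PySem.Int.floordiv (-(m : Int)) 2) + 1 = (((m+1)/2 + 1 : Nat) : Int) := by
    rw [PySem.Int.floordiv_eq_ediv_of_pos (by norm_num)]; omega
  dsimp only
  rw [hfd, PySem.List.pyRange_zero_nat, List.foldl_map]
  rw [PySem.List.foldl_congr_mem _ _
      (fun (c : Int) (k : Nat) => c + (((List.range (m + 1 - 2*k)).map (fun j => aTerm m k j)).sum : Int)) 0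
      (by
        intro c k hkmem
        simp only [List.mem_range] at hkmem
        have hNN : ((m:Int) - 2 * (k:Int) + 1).toNat = m + 1 - 2*k := by omega
        rw [PySem.List.pyRange_zero, hNN, List.foldl_map, PySem.List.foldl_add]
        congr 1
        rw [List.map_congr_left (g := fun (j : Nat) => ((aTerm m k j : Nat) : Int))
          (fun j hj => by
            simp only [List.mem_range] at hj
            have h2k : 2*k ≤ m := by omega
            simp only [pyFact, aTerm]
            have e1 : ((m:Int)).toNat = m := by omega
            have e2 : ((k:Int)).toNat = k := by omega
            have e3 : ((j:Int)).toNat = j := by omega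
            have e4 : ((m:Int) - 2*(k:Int) - (j:Int)).toNat = m - 2*k - j := by omega
            rw [e1, e2, e3, e4]
            rw [show ((k.factorial : Int) * (k.factorial : Int) * (j.factorial : Int) * ((m - 2*k - j).factorial : Int))
                = ((k.factorial * k.factorial * j.factorial * (m - 2*k - j).factorial : Nat) : Int) by push_cast; ring]
            rw [PySem.Int.floordiv_natCast])]
        rw [Nat.cast_list_sum, List.map_map]; rfl)]
  rw [PySem.List.foldl_add, zero_add, Nat.cast_list_sum, List.map_map]; rfl

lemma portB_nat (m : Nat) : pilasCompletas_alt (m : Int) = (bSum m : Int) := by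
  unfold pilasCompletas_alt bSum
  have hfd : PySem.Int.floordiv (m : Int) 2 + 1 = ((m/2 + 1 : Nat) : Int) := by
    rw [PySem.Int.floordiv_eq_ediv_of_pos (by norm_num)]; omega
  rw [hfd, PySem.List.pyRange_zero_nat, List.foldl_map, PySem.List.foldl_add, zero_add]
  rw [List.map_congr_left (g := fun k => ((m.choose (2*k) * (2*k).choose k * 2^(m - 2*k) : Nat) : Int))
    (fun k hk => by
      simp only [List.mem_range] at hk
      have h2k : 2*k ≤ m := by omega
      have e1 : ((m:Int)).toNat = m := by omega
      have e2 : (2 * (k:Int)).toNat = 2*k := by omega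
      have e3 : ((m:Int) - 2*(k:Int)).toNat = m - 2*k := by omega
      have e4 : ((k:Int)).toNat = k := by omega
      simp only [pyComb, e1, e2, e3, e4]
      push_cast
      ring)]
  rw [Nat.cast_list_sum, List.map_map]; rfl

lemma neg_case (n : Int) (hn : n < 0) :
    pilasCompletas n = 0 ∧ pilasCompletas_alt n = 0 := by
  constructor
  · by_cases h1 : n = -1
    · subst h1; decide
    · unfold pilasCompletas
      dsimp only
      have hm : -(PySem.Int.floordiv (-n) 2) + 1 ≤ 0 := by
        rw [PySem.Int.floordiv_eq_ediv_of_pos (by norm_num)]; omega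
      rw [PySem.List.pyRange_one_eq_nil hm]
      rfl
  · unfold pilasCompletas_alt
    dsimp only
    have hm : PySem.Int.floordiv n 2 + 1 ≤ 0 := by
      rw [PySem.Int.floordiv_eq_ediv_of_pos (by norm_num)]; omega
    rw [PySem.List.pyRange_one_eq_nil hm]
    rfl

-- ===== VERDICT (by name: the statement is the Claim_ definition above) =====
theorem pilasCompletas_spec : Claim_equal_pilasCompletas := by
  intro numero _
  unfold Spec_pilasCompletas
  rcases lt_or_ge numero 0 with hn | hn
  · obtain ⟨h1, h2⟩ := neg_case numero hn
    rw [h1, h2]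
  · obtain ⟨m, rfl⟩ := Int.eq_ofNat_of_zero_le hn
    rw [portA_nat, portB_nat, aSum_eq_bSum]
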